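-- pv_equiv track=rewrite | github.com/OrchIntel/ioa-core | ioa/governance/detectors/bias_detector.py | _classify_bias_type
-- ===== SOURCE A (Python) =====
-- from typing import Dict, List, Any, Optional, Tuple
--
-- def _classify_bias_type(pattern_info: Dict[str, Any], matched_text: str) -> str:
--     """Classify the type of bias detected."""
--     pattern = pattern_info["pattern"]
--     text_lower = matched_text.lower()
--
--     # Gender bias
--     if any(term in text_lower for term in ["men", "women", "male", "female", "masculine", "feminine"]):
--         return "gender_bias"
--
--     # Racial bias
--     if any(term in text_lower for term in ["black", "white", "asian", "hispanic", "african", "caucasian"]):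
--         return "racial_bias"
--
--     # Religious bias
--     if any(term in text_lower for term in ["muslim", "jewish", "christian", "hindu", "buddhist", "atheist"]):
--         return "religious_bias"
--
--     # Disability bias
--     if any(term in text_lower for term in ["disabled", "handicapped", "crippled", "retarded"]):
--         return "disability_bias"
--
--     # Age bias
--     if any(term in text_lower for term in ["elderly", "old", "young", "teenager", "senior"]):
--         return "age_bias"
--
--     # Sexual orientation bias
--     if any(term in text_lower for term in ["gay", "lesbian", "straight", "bisexual", "transgender"]):
--         return "sexual_orientation_bias"
--
--     # Socioeconomic bias
--     if any(term in text_lower for term in ["poor", "rich", "wealthy", "poverty", "affluent"]):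
--         return "socioeconomic_bias"
--
--     # General bias terms
--     if any(term in text_lower for term in ["stereotype", "prejudice", "discrimination", "bias"]):
--         return "general_bias"
--
--     return "unknown_bias"
-- ===== SOURCE B (Python) =====
-- _LABELS = [
--     "gender_bias", "racial_bias", "religious_bias", "disability_bias",
--     "age_bias", "sexual_orientation_bias", "socioeconomic_bias", "general_bias",
-- ]
--
-- # keyword -> priority (index into _LABELS); all keywords are distinct across groups
-- _KW = {}
-- for _idx, _terms in enumerate([
--     ["men", "women", "male", "female", "masculine", "feminine"],
--     ["black", "white", "asian", "hispanic", "african", "caucasian"],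
--     ["muslim", "jewish", "christian", "hindu", "buddhist", "atheist"],
--     ["disabled", "handicapped", "crippled", "retarded"],
--     ["elderly", "old", "young", "teenager", "senior"],
--     ["gay", "lesbian", "straight", "bisexual", "transgender"],
--     ["poor", "rich", "wealthy", "poverty", "affluent"],
--     ["stereotype", "prejudice", "discrimination", "bias"],
-- ]):
--     for _t in _terms:
--         _KW[_t] = _idx
--
-- _LENS = sorted({len(k) for k in _KW})
--
--
-- def _classify_bias_type(pattern_info, matched_text):
--     """Classify bias type: one pass over text positions, hash-indexed keyword windows,
--     keeping the minimal (highest-priority) matching group."""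
--     pattern = pattern_info["pattern"]  # original API contract: the dict must carry "pattern"
--     t = matched_text.lower()
--     best = len(_LABELS)
--     for i in range(len(t)):
--         for L in _LENS:
--             p = _KW.get(t[i:i + L])
--             if p is not None and p < best:
--                 best = p
--     return _LABELS[best] if best < len(_LABELS) else "unknown_bias"
-- ===== Notes on version B (the rewrite author's own statement) =====
-- stated objective: alternative
-- what changed: Instead of A's eight ordered any(term in text) scans with early return, B makes a single pass over the text positions, looking each fixed-length window up in a precomputed keyword->priority hash map and keeping the minimal matching priority, then maps that priority to its label.
import Mathlib
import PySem

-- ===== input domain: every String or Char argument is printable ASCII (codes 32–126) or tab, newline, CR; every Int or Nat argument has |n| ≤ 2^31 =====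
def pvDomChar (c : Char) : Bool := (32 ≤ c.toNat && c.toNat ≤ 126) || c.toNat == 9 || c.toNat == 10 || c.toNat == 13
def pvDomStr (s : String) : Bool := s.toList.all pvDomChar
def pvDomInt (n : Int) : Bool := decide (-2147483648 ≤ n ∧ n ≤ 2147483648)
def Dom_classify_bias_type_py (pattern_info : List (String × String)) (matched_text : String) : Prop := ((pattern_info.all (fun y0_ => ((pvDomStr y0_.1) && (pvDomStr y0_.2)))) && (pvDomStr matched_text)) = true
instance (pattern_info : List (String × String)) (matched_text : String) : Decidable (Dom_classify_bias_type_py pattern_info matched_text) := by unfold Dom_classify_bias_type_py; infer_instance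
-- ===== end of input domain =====

-- B replaces A's eight ordered any(term in text) scans by one pass over the text's
-- positions: every fixed-length window is looked up in a keyword -> priority map and the
-- minimal matching priority is kept, then translated to its label (the dead
-- pattern_info["pattern"] access is kept; inputs where it raises KeyError are outside
-- Pre_). Objective: alternative.

-- ===== PORT A =====
-- literal transliteration of A: dead dict lookup (KeyError when missing → none, excluded
-- by Pre_; the "" branch is unreachable under Pre_), then eight if/any chains in order.
def classify_bias_type_py (pattern_info : List (String × String)) (matched_text : String) : String :=
  match PySem.Dict.get? (PySem.Dict.mk pattern_info) "pattern" with
  | none => ""  -- Python raises KeyError here; outside Pre_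
  | some _pattern =>
    let text_lower := PySem.Str.lower matched_text
    if (["men", "women", "male", "female", "masculine", "feminine"].any
        (fun term => PySem.Str.isIn term text_lower)) then "gender_bias"
    else if (["black", "white", "asian", "hispanic", "african", "caucasian"].any
        (fun term => PySem.Str.isIn term text_lower)) then "racial_bias"
    else if (["muslim", "jewish", "christian", "hindu", "buddhist", "atheist"].any
        (fun term => PySem.Str.isIn term text_lower)) then "religious_bias"
    else if (["disabled", "handicapped", "crippled", "retarded"].any
        (fun term => PySem.Str.isIn term text_lower)) then "disability_bias"
    else if (["elderly", "old", "young", "teenager", "senior"].any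
        (fun term => PySem.Str.isIn term text_lower)) then "age_bias"
    else if (["gay", "lesbian", "straight", "bisexual", "transgender"].any
        (fun term => PySem.Str.isIn term text_lower)) then "sexual_orientation_bias"
    else if (["poor", "rich", "wealthy", "poverty", "affluent"].any
        (fun term => PySem.Str.isIn term text_lower)) then "socioeconomic_bias"
    else if (["stereotype", "prejudice", "discrimination", "bias"].any
        (fun term => PySem.Str.isIn term text_lower)) then "general_bias"
    else "unknown_bias"

-- ===== PORT B =====
-- Source B's module-level table: keyword -> priority (index into pvLabels); keys kept as
-- List Char (PySem's exact representation of str) since B looks up slices of the text.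
def pvLabels : List String :=
  ["gender_bias", "racial_bias", "religious_bias", "disability_bias",
   "age_bias", "sexual_orientation_bias", "socioeconomic_bias", "general_bias"]

def pvKwPairs : List (List Char × Nat) :=
  [("men".toList, 0), ("women".toList, 0), ("male".toList, 0), ("female".toList, 0),
   ("masculine".toList, 0), ("feminine".toList, 0),
   ("black".toList, 1), ("white".toList, 1), ("asian".toList, 1), ("hispanic".toList, 1),
   ("african".toList, 1), ("caucasian".toList, 1),
   ("muslim".toList, 2), ("jewish".toList, 2), ("christian".toList, 2), ("hindu".toList, 2),
   ("buddhist".toList, 2), ("atheist".toList, 2),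
   ("disabled".toList, 3), ("handicapped".toList, 3), ("crippled".toList, 3), ("retarded".toList, 3),
   ("elderly".toList, 4), ("old".toList, 4), ("young".toList, 4), ("teenager".toList, 4),
   ("senior".toList, 4),
   ("gay".toList, 5), ("lesbian".toList, 5), ("straight".toList, 5), ("bisexual".toList, 5),
   ("transgender".toList, 5),
   ("poor".toList, 6), ("rich".toList, 6), ("wealthy".toList, 6), ("poverty".toList, 6),
   ("affluent".toList, 6),
   ("stereotype".toList, 7), ("prejudice".toList, 7), ("discrimination".toList, 7),
   ("bias".toList, 7)]

def pvKw : PySem.Dict (List Char) Nat := PySem.Dict.mk pvKwPairs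

-- sorted({len(k) for k in _KW})
def pvLens : List Int := [3, 4, 5, 6, 7, 8, 9, 10, 11, 14]

-- inner loop body: p = _KW.get(t[i:i+L]); if p is not None and p < best: best = p
def pvInner (t : List Char) (i : Int) (best : Nat) (L : Int) : Nat :=
  match PySem.Dict.get? pvKw (PySem.List.slice t (some i) (some (i + L))) with
  | some p => if p < best then p else best
  | none => best

-- outer loop body: for L in _LENS
def pvOuter (t : List Char) (best : Nat) (i : Int) : Nat :=
  pvLens.foldl (pvInner t i) best

def classify_bias_type_py_alt (pattern_info : List (String × String)) (matched_text : String) : String :=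
  match PySem.Dict.get? (PySem.Dict.mk pattern_info) "pattern" with
  | none => ""  -- Python raises KeyError here; outside Pre_
  | some _pattern =>
    let t := (PySem.Str.lower matched_text).toList
    let best := (PySem.List.pyRange 0 (t.length : Int) 1).foldl (pvOuter t) 8
    if best < 8 then pvLabels.getD best "" else "unknown_bias"

-- ===== PRECONDITION & SPEC =====
-- Pre_ excludes exactly the inputs where A raises KeyError on its (dead) pattern_info["pattern"] lookup.
def Pre_classify_bias_type_py (pattern_info : List (String × String)) (matched_text : String) : Prop :=
  "pattern" ∈ pattern_info.map Prod.fst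
instance (pattern_info : List (String × String)) (matched_text : String) : Decidable (Pre_classify_bias_type_py pattern_info matched_text) := by unfold Pre_classify_bias_type_py; infer_instance

def pvWitness_classify_bias_type_py : (List (String × String)) × String := ([("pattern", "x")], "old men")

def Spec_classify_bias_type_py (pattern_info : List (String × String)) (matched_text : String) (out : String) : Prop := out = classify_bias_type_py_alt pattern_info matched_text
instance (pattern_info : List (String × String)) (matched_text : String) (out : String) : Decidable (Spec_classify_bias_type_py pattern_info matched_text out) := by unfold Spec_classify_bias_type_py; infer_instance

-- ===== CLAIM (what is proved, stated in full; the proofs are below) =====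
def Claim_equal_classify_bias_type_py : Prop := ∀ (pattern_info : List (String × String)) (matched_text : String), Dom_classify_bias_type_py pattern_info matched_text → Pre_classify_bias_type_py pattern_info matched_text → Spec_classify_bias_type_py pattern_info matched_text (classify_bias_type_py pattern_info matched_text)

-- ===== LEMMAS AND PROOFS =====

-- A's eight keyword groups, indexed by priority (proof-side view of pvKwPairs)
def pvGroups : List (List String) :=
  [["men", "women", "male", "female", "masculine", "feminine"],
   ["black", "white", "asian", "hispanic", "african", "caucasian"],
   ["muslim", "jewish", "christian", "hindu", "buddhist", "atheist"],
   ["disabled", "handicapped", "crippled", "retarded"],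
   ["elderly", "old", "young", "teenager", "senior"],
   ["gay", "lesbian", "straight", "bisexual", "transgender"],
   ["poor", "rich", "wealthy", "poverty", "affluent"],
   ["stereotype", "prejudice", "discrimination", "bias"]]

-- under Pre_, A's dict lookup succeeds
theorem pv_get?_isSome (pattern_info : List (String × String))
    (h : "pattern" ∈ pattern_info.map Prod.fst) :
    (PySem.Dict.get? (PySem.Dict.mk pattern_info) "pattern").isSome := by
  rw [← PySem.Dict.contains_eq_isSome_get?]
  rw [PySem.Dict.contains_eq_decide_mem_keys]
  simpa [PySem.Dict.keys_mk] using h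

-- generic facts about min-keeping folds
theorem pv_foldl_le_init {α : Type} (f : Nat → α → Nat) (hf : ∀ b x, f b x ≤ b)
    (l : List α) (b : Nat) : l.foldl f b ≤ b := by
  induction l generalizing b with
  | nil => simp
  | cons x l ih => exact le_trans (ih (f b x)) (hf b x)

theorem pv_foldl_cases {α : Type} (f : Nat → α → Nat) (Q : α → Nat → Prop)
    (hf : ∀ b x, f b x = b ∨ Q x (f b x)) (l : List α) (b : Nat) :
    l.foldl f b = b ∨ ∃ x ∈ l, Q x (l.foldl f b) := by
  induction l generalizing b with
  | nil => simp
  | cons x l ih =>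
    simp only [List.foldl_cons]
    rcases ih (f b x) with h | ⟨y, hy, hQ⟩
    · rw [h]
      rcases hf b x with h' | h'
      · exact Or.inl h'
      · exact Or.inr ⟨x, List.mem_cons_self, h'⟩
    · exact Or.inr ⟨y, List.mem_cons_of_mem _ hy, hQ⟩

theorem pv_foldl_le_of_mem {α : Type} (f : Nat → α → Nat) (hf : ∀ b x, f b x ≤ b)
    (l : List α) (b : Nat) (x : α) (p : Nat) (hx : x ∈ l) (hstep : ∀ b, f b x ≤ p) :
    l.foldl f b ≤ p := by
  induction l generalizing b with
  | nil => cases hx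
  | cons y l ih =>
    simp only [List.foldl_cons]
    rcases List.mem_cons.mp hx with rfl | hx'
    · exact le_trans (pv_foldl_le_init f hf l (f b x)) (hstep b)
    · exact ih (f b y) hx'

-- every table entry has priority < 8 and sits in its group
theorem pv_pairs_sound : ∀ pr ∈ pvKwPairs, pr.2 < 8 ∧
    ∃ kw ∈ pvGroups.getD pr.2 [], kw.toList = pr.1 := by decide

-- every group member is in the table with its group's priority, and its length is in pvLens
theorem pv_groups_in_table : ∀ g < 8, ∀ kw ∈ pvGroups.getD g [],
    PySem.Dict.get? pvKw kw.toList = some g ∧ (kw.toList.length : Int) ∈ pvLens ∧ kw.toList ≠ [] := by decide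

-- step facts for pvInner / pvOuter
theorem pvInner_le (t : List Char) (i : Int) (b : Nat) (L : Int) : pvInner t i b L ≤ b := by
  unfold pvInner
  cases PySem.Dict.get? pvKw (PySem.List.slice t (some i) (some (i + L))) with
  | none => exact le_refl b
  | some p => dsimp only; split <;> omega

theorem pvOuter_le (t : List Char) (b : Nat) (i : Int) : pvOuter t b i ≤ b :=
  pv_foldl_le_init (pvInner t i) (pvInner_le t i) pvLens b

theorem pvInner_cases (t : List Char) (i : Int) (b : Nat) (L : Int) :
    pvInner t i b L = b ∨
      PySem.Dict.get? pvKw (PySem.List.slice t (some i) (some (i + L))) = some (pvInner t i b L) := by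
  unfold pvInner
  cases h : PySem.Dict.get? pvKw (PySem.List.slice t (some i) (some (i + L))) with
  | none => exact Or.inl rfl
  | some p =>
    dsimp only
    split
    · exact Or.inr rfl
    · exact Or.inl rfl

theorem pvOuter_cases (t : List Char) (b : Nat) (i : Int) :
    pvOuter t b i = b ∨ ∃ L ∈ pvLens,
      PySem.Dict.get? pvKw (PySem.List.slice t (some i) (some (i + L))) = some (pvOuter t b i) :=
  pv_foldl_cases (pvInner t i)
    (fun L v => PySem.Dict.get? pvKw (PySem.List.slice t (some i) (some (i + L))) = some v)
    (fun b L => pvInner_cases t i b L) pvLens b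

theorem pvInner_le_of_hit (t : List Char) (i : Int) (L : Int) (p : Nat)
    (h : PySem.Dict.get? pvKw (PySem.List.slice t (some i) (some (i + L))) = some p)
    (b : Nat) : pvInner t i b L ≤ p := by
  unfold pvInner
  rw [h]
  dsimp only; split <;> omega

theorem pvOuter_le_of_hit (t : List Char) (i : Int) (L : Int) (p : Nat) (hL : L ∈ pvLens)
    (h : PySem.Dict.get? pvKw (PySem.List.slice t (some i) (some (i + L))) = some p)
    (b : Nat) : pvOuter t b i ≤ p :=
  pv_foldl_le_of_mem (pvInner t i) (pvInner_le t i) pvLens b L p hL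
    (pvInner_le_of_hit t i L p h)

-- any slice that the table recognises is an infix of the text
theorem pv_slice_infix (t : List Char) (i L : Int) (hi : 0 ≤ i) (hL : 0 ≤ L) :
    PySem.List.slice t (some i) (some (i + L)) <:+: t := by
  rw [PySem.List.slice_toNat t hi (by omega)]
  exact ((List.take_prefix _ _).isInfix).trans ((List.drop_suffix _ _).isInfix)

theorem pv_lens_nonneg : ∀ L ∈ pvLens, (0 : Int) ≤ L := by decide

-- B's fold value characterised against A's group conditions
-- (Mg g t = "some term of group g occurs in t")
def pvMg (g : Nat) (t : List Char) : Bool :=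
  (pvGroups.getD g []).any (fun term => PySem.Chars.isIn term.toList t)

-- if group g matches, B's fold is ≤ g
theorem pv_best_le_of_Mg (t : List Char) (g : Nat) (hg : g < 8) (hM : pvMg g t = true) :
    (PySem.List.pyRange 0 (t.length : Int) 1).foldl (pvOuter t) 8 ≤ g := by
  unfold pvMg at hM
  rcases List.any_eq_true.mp hM with ⟨kw, hkw, hin⟩
  obtain ⟨hget, hlen, hne⟩ := pv_groups_in_table g hg kw hkw
  rcases (PySem.Chars.exists_prefix_drop_iff_isIn kw.toList t).mpr hin with ⟨j, hpre⟩
  have hjlt : j < t.length := by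
    by_contra hge
    have hd : t.drop j = [] := List.drop_eq_nil_of_le (by omega)
    rw [hd] at hpre
    exact hne (List.prefix_nil.mp hpre)
  have hslice : PySem.List.slice t (some (j : Int)) (some ((j : Int) + (kw.toList.length : Int)))
      = kw.toList := by
    rw [PySem.List.slice_toNat t (by positivity) (by positivity)]
    have h2 : ((j : Int) + (kw.toList.length : Int)).toNat = j + kw.toList.length := by omega
    rw [Int.toNat_natCast, h2, Nat.add_sub_cancel_left]
    exact (List.prefix_iff_eq_take.mp hpre).symm
  have hmem : (j : Int) ∈ PySem.List.pyRange 0 (t.length : Int) 1 :=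
    PySem.List.mem_pyRange_one.mpr ⟨by positivity, by exact_mod_cast hjlt⟩
  exact pv_foldl_le_of_mem (pvOuter t) (pvOuter_le t) _ 8 (j : Int) g hmem
    (fun b => pvOuter_le_of_hit t (j : Int) (kw.toList.length : Int) g hlen
      (by rw [hslice]; exact hget) b)

-- if B's fold lands on p < 8, group p matches
theorem pv_Mg_of_best (t : List Char) (p : Nat)
    (hp : (PySem.List.pyRange 0 (t.length : Int) 1).foldl (pvOuter t) 8 = p) (hlt : p < 8) :
    pvMg p t = true := by
  rcases pv_foldl_cases (pvOuter t)
      (fun i v => ∃ L ∈ pvLens,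
        PySem.Dict.get? pvKw (PySem.List.slice t (some i) (some (i + L))) = some v)
      (fun b i => pvOuter_cases t b i) (PySem.List.pyRange 0 (t.length : Int) 1) 8 with
    h8 | ⟨i, hi, L, hL, hget⟩
  · omega
  · rw [hp] at hget
    have hpair : (PySem.List.slice t (some i) (some (i + L)), p) ∈ pvKwPairs :=
      PySem.Dict.mem_items_of_get?_eq_some _ hget
    obtain ⟨-, kw, hkw, hkweq⟩ := pv_pairs_sound _ hpair
    have hi0 : (0 : Int) ≤ i := (PySem.List.mem_pyRange_one.mp hi).1
    have hinf : kw.toList <:+: t := by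
      rw [hkweq]; exact pv_slice_infix t i L hi0 (pv_lens_nonneg L hL)
    unfold pvMg
    exact List.any_eq_true.mpr ⟨kw, hkw, (PySem.Chars.isIn_iff_infix kw.toList t).mpr hinf⟩

-- ===== VERDICT (by name: the statement is the Claim_ definition above) =====
theorem classify_bias_type_py_spec : Claim_equal_classify_bias_type_py := by
  intro pattern_info matched_text _ hpre
  unfold Spec_classify_bias_type_py classify_bias_type_py classify_bias_type_py_alt
  have hs := pv_get?_isSome pattern_info hpre
  cases hg : PySem.Dict.get? (PySem.Dict.mk pattern_info) "pattern" with
  | none => simp [hg] at hs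
  | some v =>
    dsimp only
    set t := (PySem.Str.lower matched_text).toList with ht
    have e0 : (["men", "women", "male", "female", "masculine", "feminine"].any
        (fun term => PySem.Str.isIn term (PySem.Str.lower matched_text))) = pvMg 0 t := by
      simp [pvMg, pvGroups, ht]
    have e1 : (["black", "white", "asian", "hispanic", "african", "caucasian"].any
        (fun term => PySem.Str.isIn term (PySem.Str.lower matched_text))) = pvMg 1 t := by
      simp [pvMg, pvGroups, ht]
    have e2 : (["muslim", "jewish", "christian", "hindu", "buddhist", "atheist"].any
        (fun term => PySem.Str.isIn term (PySem.Str.lower matched_text))) = pvMg 2 t := by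
      simp [pvMg, pvGroups, ht]
    have e3 : (["disabled", "handicapped", "crippled", "retarded"].any
        (fun term => PySem.Str.isIn term (PySem.Str.lower matched_text))) = pvMg 3 t := by
      simp [pvMg, pvGroups, ht]
    have e4 : (["elderly", "old", "young", "teenager", "senior"].any
        (fun term => PySem.Str.isIn term (PySem.Str.lower matched_text))) = pvMg 4 t := by
      simp [pvMg, pvGroups, ht]
    have e5 : (["gay", "lesbian", "straight", "bisexual", "transgender"].any
        (fun term => PySem.Str.isIn term (PySem.Str.lower matched_text))) = pvMg 5 t := by
      simp [pvMg, pvGroups, ht]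
    have e6 : (["poor", "rich", "wealthy", "poverty", "affluent"].any
        (fun term => PySem.Str.isIn term (PySem.Str.lower matched_text))) = pvMg 6 t := by
      simp [pvMg, pvGroups, ht]
    have e7 : (["stereotype", "prejudice", "discrimination", "bias"].any
        (fun term => PySem.Str.isIn term (PySem.Str.lower matched_text))) = pvMg 7 t := by
      simp [pvMg, pvGroups, ht]
    rw [e0, e1, e2, e3, e4, e5, e6, e7]
    set b := (PySem.List.pyRange 0 (t.length : Int) 1).foldl (pvOuter t) 8 with hb
    have hble : b ≤ 8 := pv_foldl_le_init (pvOuter t) (pvOuter_le t) _ 8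
    have hlo : ∀ g, g < b → pvMg g t = false := by
      intro g hgb
      by_contra hgt
      rw [Bool.not_eq_false] at hgt
      have := pv_best_le_of_Mg t g (by omega) hgt
      omega
    rcases Nat.lt_or_ge b 8 with h8 | h8
    · have hM := pv_Mg_of_best t b hb.symm h8
      interval_cases b
      · simp [pvLabels, hM]
      · simp [pvLabels, hM, hlo 0 (by norm_num)]
      · simp [pvLabels, hM, hlo 0 (by norm_num), hlo 1 (by norm_num)]
      · simp [pvLabels, hM, hlo 0 (by norm_num), hlo 1 (by norm_num), hlo 2 (by norm_num)]
      · simp [pvLabels, hM, hlo 0 (by norm_num), hlo 1 (by norm_num), hlo 2 (by norm_num),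
          hlo 3 (by norm_num)]
      · simp [pvLabels, hM, hlo 0 (by norm_num), hlo 1 (by norm_num), hlo 2 (by norm_num),
          hlo 3 (by norm_num), hlo 4 (by norm_num)]
      · simp [pvLabels, hM, hlo 0 (by norm_num), hlo 1 (by norm_num), hlo 2 (by norm_num),
          hlo 3 (by norm_num), hlo 4 (by norm_num), hlo 5 (by norm_num)]
      · simp [pvLabels, hM, hlo 0 (by norm_num), hlo 1 (by norm_num), hlo 2 (by norm_num),
          hlo 3 (by norm_num), hlo 4 (by norm_num), hlo 5 (by norm_num), hlo 6 (by norm_num)]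
    · have hb8 : b = 8 := by omega
      rw [hb8]
      simp [hlo 0 (by omega), hlo 1 (by omega), hlo 2 (by omega), hlo 3 (by omega),
        hlo 4 (by omega), hlo 5 (by omega), hlo 6 (by omega), hlo 7 (by omega)]
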